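-- pv_equiv track=rewrite | github.com/meera-tbd/scrapper_job | script/adecco_australia_scraper.py | _is_valid_location
-- ===== SOURCE A (Python) =====
-- def _is_valid_location(loc: str) -> bool:
--     if not loc:
--         return False
--     l = loc.strip()
--     if '$' in l or 'hour' in l.lower() or 'salary' in l.lower():
--         return False
--     states = ['NSW', 'QLD', 'VIC', 'WA', 'SA', 'TAS', 'NT', 'ACT',
--               'New South Wales', 'Queensland', 'Victoria', 'Western Australia', 'South Australia', 'Tasmania', 'Northern Territory']
--     if any(s.lower() in l.lower() for s in states):
--         return True
--     return False
-- ===== SOURCE B (Python) =====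
-- def _is_valid_location(loc: str) -> bool:
--     if not loc:
--         return False
--     ll = loc.strip().lower()
--     if '$' in ll or 'hour' in ll or 'salary' in ll:
--         return False
--     names = ('nsw', 'qld', 'vic', 'wa', 'sa', 'tas', 'nt', 'act',
--              'new south wales', 'queensland', 'victoria', 'western australia',
--              'south australia', 'tasmania', 'northern territory')
--     for i in range(len(ll)):
--         if any(ll.startswith(n, i) for n in names):
--             return True
--     return False
-- ===== Notes on version B (the rewrite author's own statement) =====
-- stated objective: alternative
-- what changed: B lowercases the stripped string once and replaces A's state-major loop of repeated substring scans (each re-lowering the input) by a single position-major scan that checks at every index whether some lowercase state name starts there.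
import Mathlib
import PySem

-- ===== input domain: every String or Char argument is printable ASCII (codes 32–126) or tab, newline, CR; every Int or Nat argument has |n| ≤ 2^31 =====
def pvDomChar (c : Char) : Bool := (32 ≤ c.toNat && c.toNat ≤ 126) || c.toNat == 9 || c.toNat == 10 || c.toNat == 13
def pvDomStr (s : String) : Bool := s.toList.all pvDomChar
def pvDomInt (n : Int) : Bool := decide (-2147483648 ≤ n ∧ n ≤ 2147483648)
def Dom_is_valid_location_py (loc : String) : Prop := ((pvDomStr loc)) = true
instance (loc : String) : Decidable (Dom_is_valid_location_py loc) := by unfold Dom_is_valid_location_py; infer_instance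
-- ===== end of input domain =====

-- B lowercases the stripped string once and replaces A's state-major substring loop by a
-- single position-major scan checking whether any lowercase state name starts at each index.

-- ===== PORT A =====
def pvStatesA : List String :=
  ["NSW", "QLD", "VIC", "WA", "SA", "TAS", "NT", "ACT",
   "New South Wales", "Queensland", "Victoria", "Western Australia",
   "South Australia", "Tasmania", "Northern Territory"]

def is_valid_location_py (loc : String) : Bool :=
  if loc == "" then false
  else
    let l := PySem.Str.strip loc
    if PySem.Str.isIn "$" l || PySem.Str.isIn "hour" (PySem.Str.lower l)
        || PySem.Str.isIn "salary" (PySem.Str.lower l) then false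
    else if pvStatesA.any (fun s => PySem.Str.isIn (PySem.Str.lower s) (PySem.Str.lower l)) then true
    else false

-- ===== PORT B =====
def pvNamesB : List (List Char) :=
  ["nsw".toList, "qld".toList, "vic".toList, "wa".toList, "sa".toList, "tas".toList,
   "nt".toList, "act".toList, "new south wales".toList, "queensland".toList,
   "victoria".toList, "western australia".toList, "south australia".toList,
   "tasmania".toList, "northern territory".toList]

-- the 'for i in range(len(ll))' loop: walk the suffixes, checking ll.startswith(n, i)
def pvScanB : List Char → Bool
  | [] => false
  | c :: rest => if pvNamesB.any (fun n => n.isPrefixOf (c :: rest)) then true else pvScanB rest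

def is_valid_location_py_alt (loc : String) : Bool :=
  if loc == "" then false
  else
    let ll := PySem.Str.lower (PySem.Str.strip loc)
    if PySem.Str.isIn "$" ll || PySem.Str.isIn "hour" ll || PySem.Str.isIn "salary" ll then false
    else pvScanB ll.toList

-- ===== PRECONDITION & SPEC =====
def Spec_is_valid_location_py (loc : String) (out : Bool) : Prop := out = is_valid_location_py_alt loc
instance (loc : String) (out : Bool) : Decidable (Spec_is_valid_location_py loc out) := by unfold Spec_is_valid_location_py; infer_instance

-- ===== CLAIM (what is proved, stated in full; the proofs are below) =====
def Claim_equal_is_valid_location_py : Prop := ∀ (loc : String), Dom_is_valid_location_py loc → Spec_is_valid_location_py loc (is_valid_location_py loc)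

-- ===== LEMMAS AND PROOFS =====

-- lowercasing never produces or removes a '$'
theorem pv_lowerChar_dollar (c : Char) : PySem.Chars.lowerChar c = '$' ↔ c = '$' := by
  unfold PySem.Chars.lowerChar PySem.Chars.isupper
  split_ifs with h
  · constructor
    · intro hc
      exfalso
      simp only [Bool.and_eq_true, decide_eq_true_eq] at h
      have h1 : 65 ≤ c.toNat := h.1
      have h2 : c.toNat ≤ 90 := h.2
      have hofs : (Char.ofNat (c.toNat + 32)).toNat = c.toNat + 32 := by
        have hv : Nat.isValidChar (c.toNat + 32) := Or.inl (by omega)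
        rw [Char.ofNat, dif_pos hv]
        rfl
      have h36 : (Char.ofNat (c.toNat + 32)).toNat = ('$' : Char).toNat := by rw [hc]
      rw [hofs] at h36
      have : ('$' : Char).toNat = 36 := by decide
      omega
    · intro hc
      exfalso
      rw [hc] at h
      simp at h
  · exact Iff.rfl

theorem pv_dollar_lower (l : List Char) :
    PySem.Chars.isIn "$".toList (PySem.Chars.lower l) = PySem.Chars.isIn "$".toList l := by
  have hsl : ("$" : String).toList = ['$'] := rfl
  rw [hsl]
  have h3 : '$' ∈ PySem.Chars.lower l ↔ '$' ∈ l := by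
    unfold PySem.Chars.lower
    simp only [List.mem_map]
    constructor
    · rintro ⟨c, hc, hlc⟩
      rwa [(pv_lowerChar_dollar c).mp hlc] at hc
    · intro hc
      exact ⟨'$', hc, (pv_lowerChar_dollar '$').mpr rfl⟩
  rw [Bool.eq_iff_iff, PySem.Chars.isIn_iff_infix, PySem.Chars.isIn_iff_infix,
    List.singleton_infix_iff, List.singleton_infix_iff]
  exact h3

-- B's position-major scan finds exactly the names occurring as substrings
theorem pv_scan_eq (cs : List Char) :
    pvScanB cs = pvNamesB.any (fun n => PySem.Chars.isIn n cs) := by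
  induction cs with
  | nil => decide
  | cons c rest ih =>
    unfold pvScanB
    rw [ih, Bool.eq_iff_iff]
    by_cases h : pvNamesB.any (fun n => n.isPrefixOf (c :: rest)) = true
    · rw [if_pos h]
      simp only [true_iff, List.any_eq_true, List.isPrefixOf_iff_prefix] at h ⊢
      obtain ⟨n, hn, hp⟩ := h
      exact ⟨n, hn, by rw [PySem.Chars.isIn_iff_infix]; exact hp.isInfix⟩
    · rw [if_neg h]
      simp only [List.any_eq_true, List.isPrefixOf_iff_prefix, not_exists] at h
      simp only [List.any_eq_true, PySem.Chars.isIn_iff_infix, List.infix_cons_iff]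
      constructor
      · rintro ⟨n, hn, hi⟩
        exact ⟨n, hn, Or.inr hi⟩
      · rintro ⟨n, hn, hp | hi⟩
        · exact absurd (⟨hn, hp⟩ : _ ∧ _) (h n)
        · exact ⟨n, hn, hi⟩

-- A's lowered state names are exactly B's name list
theorem pv_states_lower (L : List Char) :
    pvStatesA.any (fun s => PySem.Chars.isIn (PySem.Chars.lower s.toList) L)
      = pvNamesB.any (fun n => PySem.Chars.isIn n L) := by
  have h : pvStatesA.map (fun s => PySem.Chars.lower s.toList) = pvNamesB := by decide
  rw [← h, List.any_map]
  rfl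

-- ===== VERDICT (by name: the statement is the Claim_ definition above) =====
theorem is_valid_location_py_spec : Claim_equal_is_valid_location_py := by
  intro loc _
  unfold Spec_is_valid_location_py is_valid_location_py is_valid_location_py_alt
  by_cases he : loc == ""
  · rw [if_pos he, if_pos he]
  · rw [if_neg he, if_neg he]
    simp only [PySem.Str.isIn_eq, PySem.Str.toList_lower, PySem.Str.toList_strip, pv_dollar_lower]
    by_cases hb : (PySem.Chars.isIn "$".toList (PySem.Chars.strip loc.toList)
        || PySem.Chars.isIn "hour".toList (PySem.Chars.lower (PySem.Chars.strip loc.toList))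
        || PySem.Chars.isIn "salary".toList (PySem.Chars.lower (PySem.Chars.strip loc.toList))) = true
    · rw [if_pos hb, if_pos hb]
    · rw [if_neg hb, if_neg hb, pv_scan_eq, ← pv_states_lower]
      by_cases ha : pvStatesA.any (fun s =>
          PySem.Chars.isIn (PySem.Chars.lower s.toList) (PySem.Chars.lower (PySem.Chars.strip loc.toList))) = true
      · rw [if_pos ha, ha]
      · rw [if_neg ha, Bool.not_eq_true] at *
        rw [ha]
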